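-- pv_equiv track=rewrite | github.com/MATVEYKAO4EN/calculator | mat.py | fromTroichn
-- ===== SOURCE A (Python) =====
-- def ostatok(a,b):
--    return a-(a//b)*b
--
-- def fromTroichn(a):
--     result = 0
--     c = 1
--     while a!=0:
--         result +=ostatok(a,10)*c
--         c = c*3
--         a = a//10
--     return result
-- ===== SOURCE B (Python) =====
-- def ostatok(a, b):
--     return a - (a // b) * b
--
-- def fromTroichn(a):
--     digits = []
--     while a != 0:
--         digits.append(a % 10)
--         a = a // 10
--     value = 0
--     for d in reversed(digits):
--         value = value * 3 + d
--     return value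
-- ===== Notes on version B (the rewrite author's own statement) =====
-- stated objective: alternative
-- what changed: Replaced A's single loop with a power-of-3 weight accumulator by two staged passes: first extract the decimal digits into an explicit list (least-significant first), then Horner-fold over the reversed list (value*3 + digit).
import Mathlib
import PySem

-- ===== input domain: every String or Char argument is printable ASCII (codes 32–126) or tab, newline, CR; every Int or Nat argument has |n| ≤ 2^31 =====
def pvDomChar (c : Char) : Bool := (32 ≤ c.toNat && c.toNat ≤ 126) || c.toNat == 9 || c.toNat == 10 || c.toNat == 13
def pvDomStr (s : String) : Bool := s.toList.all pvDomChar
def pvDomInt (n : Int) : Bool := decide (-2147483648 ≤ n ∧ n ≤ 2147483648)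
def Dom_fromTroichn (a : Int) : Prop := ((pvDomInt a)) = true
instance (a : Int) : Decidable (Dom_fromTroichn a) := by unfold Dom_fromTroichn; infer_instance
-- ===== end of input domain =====

-- B: two staged passes (explicit decimal-digit list, then Horner fold over its reverse) instead of A's single loop with a power-of-3 accumulator; the ports agree on every input (on a < 0 both Pythons diverge; the fuel guard makes both ports total there).

-- ===== PORT A =====
def ostatok (a b : Int) : Int := a - (PySem.Int.floordiv a b) * b

-- the while-loop of A, with a fuel counter only to make it total (Python diverges for a < 0, excluded by Pre_;
-- for a ≥ 0 the loop runs at most a.toNat times, so fuel a.toNat + 1 never runs out)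
def fromTroichnLoop : Nat → Int → Int → Int → Int
  | 0, _, result, _ => result
  | n + 1, a, result, c =>
    if a ≤ 0 then result
    else fromTroichnLoop n (PySem.Int.floordiv a 10) (result + ostatok a 10 * c) (c * 3)

def fromTroichn (a : Int) : Int := fromTroichnLoop (a.toNat + 1) a 0 1

-- ===== PORT B =====
-- pass 1 of Source B: collect the decimal digits, least-significant first (digits.append(a % 10); a //= 10);
-- same fuel-for-totality device as the A-side loop
def collectDigits : Nat → Int → List Int → List Int
  | 0, _, ds => ds
  | n + 1, a, ds =>
    if a ≤ 0 then ds
    else collectDigits n (PySem.Int.floordiv a 10) (ds ++ [PySem.Int.mod a 10])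

-- pass 2 of Source B: 'for d in reversed(digits): value = value*3 + d'
def fromTroichn_alt (a : Int) : Int :=
  (collectDigits (a.toNat + 1) a []).reverse.foldl (fun value d => value * 3 + d) 0

-- ===== PRECONDITION & SPEC =====
def Spec_fromTroichn (a : Int) (out : Int) : Prop := out = fromTroichn_alt a
instance (a : Int) (out : Int) : Decidable (Spec_fromTroichn a out) := by unfold Spec_fromTroichn; infer_instance

-- ===== CLAIM (what is proved, stated in full; the proofs are below) =====
def Claim_equal_fromTroichn : Prop := ∀ (a : Int), Dom_fromTroichn a → Spec_fromTroichn a (fromTroichn a)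

-- ===== LEMMAS AND PROOFS =====

-- proof-only Horner characterisation of the result, on the same fuel
def pvHorner : Nat → Int → Int
  | 0, _ => 0
  | n + 1, a =>
    if a ≤ 0 then 0
    else pvHorner n (PySem.Int.floordiv a 10) * 3 + PySem.Int.mod a 10

theorem ostatok_eq_mod (a : Int) : ostatok a 10 = PySem.Int.mod a 10 := by
  simp [ostatok, PySem.Int.mod, PySem.Int.floordiv, Int.fmod_def]
  ring

-- A's loop invariant: the loop adds c * (Horner value of a) to result
theorem fromTroichnLoop_eq : ∀ (n : Nat) (a result c : Int),
    fromTroichnLoop n a result c = result + c * pvHorner n a := by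
  intro n
  induction n with
  | zero => intro a result c; simp [fromTroichnLoop, pvHorner]
  | succ n ih =>
    intro a result c
    rw [fromTroichnLoop, pvHorner]
    by_cases h : a ≤ 0
    · simp [h]
    · simp only [if_neg h]
      rw [ih, ostatok_eq_mod]
      ring

-- B's first pass only appends to its accumulator
theorem collectDigits_append : ∀ (n : Nat) (a : Int) (ds : List Int),
    collectDigits n a ds = ds ++ collectDigits n a [] := by
  intro n
  induction n with
  | zero => intro a ds; simp [collectDigits]
  | succ n ih =>
    intro a ds
    rw [collectDigits]
    conv_rhs => rw [collectDigits]
    by_cases h : a ≤ 0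
    · simp [h]
    · simp only [if_neg h, List.nil_append]
      rw [ih _ (ds ++ [PySem.Int.mod a 10]), ih _ ([PySem.Int.mod a 10])]
      simp

-- B's two passes compute the Horner value
theorem alt_eq_horner : ∀ (n : Nat) (a : Int),
    (collectDigits n a []).reverse.foldl (fun value d => value * 3 + d) 0 = pvHorner n a := by
  intro n
  induction n with
  | zero => intro a; simp [collectDigits, pvHorner]
  | succ n ih =>
    intro a
    rw [collectDigits, pvHorner]
    by_cases h : a ≤ 0
    · simp [h]
    · simp only [if_neg h, List.nil_append]
      rw [collectDigits_append n (PySem.Int.floordiv a 10) [PySem.Int.mod a 10]]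
      rw [show [PySem.Int.mod a 10] ++ collectDigits n (PySem.Int.floordiv a 10) []
            = PySem.Int.mod a 10 :: collectDigits n (PySem.Int.floordiv a 10) [] from rfl,
          List.reverse_cons, List.foldl_append, ih]
      rfl

-- ===== VERDICT (by name: the statement is the Claim_ definition above) =====
theorem fromTroichn_spec : Claim_equal_fromTroichn := by
  intro a _
  unfold Spec_fromTroichn fromTroichn fromTroichn_alt
  rw [fromTroichnLoop_eq, alt_eq_horner]
  ring
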